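-- pv_equiv track=rewrite | github.com/twosidesofai/Job_Hunter | resume_builder.py | _select_relevant_projects
-- ===== SOURCE A (Python) =====
-- from typing import List, Dict, Any, Optional
--
-- def _select_relevant_projects(master_projects: List[Dict[str, str]], job_requirements: Dict[str, Any]) -> List[Dict[str, str]]:
--     """
--     Select the most relevant projects for the job.
--     """
--     # Simple relevance scoring based on keyword matching
--     relevant_projects = []
--     required_skills = job_requirements.get("required_skills", [])
--     keywords = job_requirements.get("industry_keywords", [])
--
--     for project in master_projects:
--         score = 0
--         project_text = f"{project.get('name', '')} {project.get('description', '')}".lower()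
--
--         for skill in required_skills:
--             if skill.lower() in project_text:
--                 score += 2
--
--         for keyword in keywords:
--             if keyword.lower() in project_text:
--                 score += 1
--
--         if score > 0:
--             relevant_projects.append((score, project))
--
--     # Sort by relevance score and return top 3
--     relevant_projects.sort(key=lambda x: x[0], reverse=True)
--     return [project[1] for project in relevant_projects[:3]]
-- ===== SOURCE B (Python) =====
-- def _insert_top(score, project, top):
--     """Insert (score, project) into the score-descending list `top`,
--     after all entries with score >= the new score (keeps arrival order on ties)."""
--     if not top or top[0][0] < score:
--         return [(score, project)] + top
--     return top[:1] + _insert_top(score, project, top[1:])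
--
--
-- def _select_relevant_projects(master_projects, job_requirements):
--     required_skills = job_requirements.get("required_skills", [])
--     keywords = job_requirements.get("industry_keywords", [])
--     top = []  # at most 3 (score, project) pairs, best first
--     for project in master_projects:
--         text = f"{project.get('name', '')} {project.get('description', '')}".lower()
--         score = 2 * sum(s.lower() in text for s in required_skills) \
--                 + sum(k.lower() in text for k in keywords)
--         if score > 0:
--             top = _insert_top(score, project, top)[:3]
--     return [project for _, project in top]
-- ===== Notes on version B (the rewrite author's own statement) =====
-- stated objective: alternative
-- what changed: Instead of collecting every positively scored project, stable-sorting the whole list by score (reverse=True) and slicing the top 3, B keeps a bounded best-3 list updated online by a single insertion per project (and scores with sums over generator expressions instead of accumulator loops), so no full relevant list and no final sort exist.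
import Mathlib
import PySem

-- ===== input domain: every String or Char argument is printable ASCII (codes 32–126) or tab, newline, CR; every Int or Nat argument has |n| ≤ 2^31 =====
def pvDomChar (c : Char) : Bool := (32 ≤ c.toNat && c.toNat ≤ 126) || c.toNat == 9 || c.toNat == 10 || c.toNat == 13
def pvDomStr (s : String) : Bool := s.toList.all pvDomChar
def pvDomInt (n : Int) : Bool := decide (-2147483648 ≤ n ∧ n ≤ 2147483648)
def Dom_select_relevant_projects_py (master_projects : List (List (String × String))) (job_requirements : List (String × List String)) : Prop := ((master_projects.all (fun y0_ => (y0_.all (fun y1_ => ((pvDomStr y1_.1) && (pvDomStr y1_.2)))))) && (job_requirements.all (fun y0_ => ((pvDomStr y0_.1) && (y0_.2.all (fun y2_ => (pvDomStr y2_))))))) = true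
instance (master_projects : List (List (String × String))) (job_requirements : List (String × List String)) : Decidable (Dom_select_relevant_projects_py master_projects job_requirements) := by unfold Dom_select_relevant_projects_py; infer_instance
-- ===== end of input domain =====

-- B replaces "collect all positively scored projects, full stable reverse sort, take 3"
-- by an online bounded insertion that keeps only the current top 3 (alternative decomposition).

-- ===== PORT A =====
-- project_text = f"{project.get('name','')} {project.get('description','')}".lower()
def pvTextA (project : List (String × String)) : String :=
  PySem.Str.lower (PySem.Str.join " "
    [PySem.Dict.getD (PySem.Dict.mk project) "name" "",
     PySem.Dict.getD (PySem.Dict.mk project) "description" ""])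

def select_relevant_projects_py (master_projects : List (List (String × String))) (job_requirements : List (String × List String)) : List (List (String × String)) :=
  let required_skills := PySem.Dict.getD (PySem.Dict.mk job_requirements) "required_skills" []
  let keywords := PySem.Dict.getD (PySem.Dict.mk job_requirements) "industry_keywords" []
  let relevant_projects := master_projects.foldl (fun acc project =>
    let project_text := pvTextA project
    let score : Int := required_skills.foldl
      (fun s skill => if PySem.Str.isIn (PySem.Str.lower skill) project_text then s + 2 else s) 0
    let score := keywords.foldl
      (fun s keyword => if PySem.Str.isIn (PySem.Str.lower keyword) project_text then s + 1 else s) score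
    if score > 0 then acc ++ [(score, project)] else acc) []
  ((PySem.List.sorted relevant_projects (fun x => x.1) true).take 3).map (fun p => p.2)

-- ===== PORT B =====
def pvTextB (project : List (String × String)) : String :=
  PySem.Str.lower (PySem.Str.join " "
    [PySem.Dict.getD (PySem.Dict.mk project) "name" "",
     PySem.Dict.getD (PySem.Dict.mk project) "description" ""])

-- B's _insert_top: insert after all entries scoring >= the new score
def pvInsertTop (score : Int) (project : List (String × String)) :
    List (Int × List (String × String)) → List (Int × List (String × String))
  | [] => [(score, project)]
  | e :: t => if e.1 < score then (score, project) :: e :: t else e :: pvInsertTop score project t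

def select_relevant_projects_py_alt (master_projects : List (List (String × String))) (job_requirements : List (String × List String)) : List (List (String × String)) :=
  let required_skills := PySem.Dict.getD (PySem.Dict.mk job_requirements) "required_skills" []
  let keywords := PySem.Dict.getD (PySem.Dict.mk job_requirements) "industry_keywords" []
  let top := master_projects.foldl (fun top project =>
    let text := pvTextB project
    let score : Int :=
      2 * (required_skills.countP (fun s => PySem.Str.isIn (PySem.Str.lower s) text) : Int)
      + (keywords.countP (fun k => PySem.Str.isIn (PySem.Str.lower k) text) : Int)
    if score > 0 then (pvInsertTop score project top).take 3 else top) []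
  top.map (fun p => p.2)

-- ===== PRECONDITION & SPEC =====
def Spec_select_relevant_projects_py (master_projects : List (List (String × String))) (job_requirements : List (String × List String)) (out : List (List (String × String))) : Prop := out = select_relevant_projects_py_alt master_projects job_requirements
instance (master_projects : List (List (String × String))) (job_requirements : List (String × List String)) (out : List (List (String × String))) : Decidable (Spec_select_relevant_projects_py master_projects job_requirements out) := by unfold Spec_select_relevant_projects_py; infer_instance

-- ===== CLAIM (what is proved, stated in full; the proofs are below) =====
def Claim_equal_select_relevant_projects_py : Prop := ∀ (master_projects : List (List (String × String))) (job_requirements : List (String × List String)), Dom_select_relevant_projects_py master_projects job_requirements → Spec_select_relevant_projects_py master_projects job_requirements (select_relevant_projects_py master_projects job_requirements)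

-- ===== LEMMAS AND PROOFS =====

-- A's "+2 per hit" loop counts matches
theorem pv_foldl_two {α : Type} (p : α → Bool) (l : List α) (a : Int) :
    l.foldl (fun s x => if p x then s + 2 else s) a = a + 2 * (l.countP p : Int) := by
  induction l generalizing a with
  | nil => simp
  | cons x t ih =>
    by_cases h : p x <;> simp [List.foldl_cons, h, ih, List.countP_cons] <;> ring

-- B's _insert_top is the reverse-stable insertion step of Python's sorted(…, reverse=True)
theorem pvInsertTop_eq_insertBy (s : Int) (pr : List (String × String))
    (l : List (Int × List (String × String))) :
    pvInsertTop s pr l =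
      PySem.List.insertBy (fun a b => decide (b.1 < a.1)) (s, pr) l := by
  induction l with
  | nil => rfl
  | cons e t ih =>
    by_cases h : e.1 < s <;> simp [pvInsertTop, PySem.List.insertBy, h, ih]

-- truncating to the top n commutes with one stable insertion
theorem pv_take_insertBy {α : Type} (before : α → α → Bool) (x : α) (l : List α) (n : Nat) :
    (PySem.List.insertBy before x l).take n =
      (PySem.List.insertBy before x (l.take n)).take n := by
  induction l generalizing n with
  | nil => simp
  | cons y ys ih =>
    cases n with
    | zero => simp
    | succ m =>
      by_cases h : before x y
      · simp only [PySem.List.insertBy, h, if_true, List.take_succ_cons]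
        congr 1
        rw [show (y :: List.take m ys) = List.take (m + 1) (y :: ys) from rfl, List.take_take]
        simp [Nat.min_def]
      · simp only [List.take_succ_cons, PySem.List.insertBy, h]
        simp only [Bool.false_eq_true, if_false, List.take_succ_cons, List.cons.injEq, true_and]
        exact ih m

-- the bounded fold is the take-3 of the full insertion-sort fold
theorem pv_fold_take {α : Type} (before : α → α → Bool) (R : List α) (L : List α) :
    R.foldl (fun t x => (PySem.List.insertBy before x t).take 3) (L.take 3) =
      (R.foldl (fun acc x => PySem.List.insertBy before x acc) L).take 3 := by
  induction R generalizing L with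
  | nil => rfl
  | cons x t ih =>
    simp only [List.foldl_cons]
    rw [← pv_take_insertBy, ih]

-- a filtered fold over the source list is a fold over the filtered mapped list
theorem pv_fold_filter {α β γ : Type} (p : α → Prop) [DecidablePred p] (f : α → β)
    (g : β → γ → γ) (l : List α) (init : γ) :
    l.foldl (fun t x => if p x then g (f x) t else t) init =
      ((l.filter (fun x => decide (p x))).map f).foldl (fun t y => g y t) init := by
  induction l generalizing init with
  | nil => rfl
  | cons x t ih =>
    by_cases h : p x <;> simp [List.foldl_cons, List.filter_cons, h, ih]

-- the whole pipeline, for any two pointwise-equal score functions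
theorem pv_main (scA scB : List (String × String) → Int)
    (h : ∀ p, scA p = scB p) (mps : List (List (String × String))) :
    ((PySem.List.sorted
        (mps.foldl (fun acc p => if scA p > 0 then acc ++ [(scA p, p)] else acc)
          ([] : List (Int × List (String × String))))
        (fun x => x.1) true).take 3).map (fun p => p.2) =
      (mps.foldl (fun top p => if scB p > 0 then (pvInsertTop (scB p) p top).take 3 else top)
        []).map (fun p => p.2) := by
  simp only [h]
  rw [PySem.List.sorted_rev_eq_foldl_insertBy,
    PySem.List.foldl_append_ite (fun p => scB p > 0) (fun p => ((scB p : Int), p)),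
    pv_fold_filter (fun x => scB x > 0) (fun p => ((scB p : Int), p))
      (fun y t => (pvInsertTop y.1 y.2 t).take 3) mps []]
  simp only [pvInsertTop_eq_insertBy, List.nil_append]
  rw [show ([] : List (Int × List (String × String))) =
      ([] : List (Int × List (String × String))).take 3 from rfl, pv_fold_take]
  simp

-- ===== VERDICT (by name: the statement is the Claim_ definition above) =====
theorem select_relevant_projects_py_spec : Claim_equal_select_relevant_projects_py := by
  intro mps jr _
  exact pv_main
    (fun project =>
      (PySem.Dict.getD (PySem.Dict.mk jr) "industry_keywords" []).foldl
        (fun s keyword => if PySem.Str.isIn (PySem.Str.lower keyword) (pvTextA project) then s + 1 else s)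
        ((PySem.Dict.getD (PySem.Dict.mk jr) "required_skills" []).foldl
          (fun s skill => if PySem.Str.isIn (PySem.Str.lower skill) (pvTextA project) then s + 2 else s) 0))
    (fun project =>
      2 * ((PySem.Dict.getD (PySem.Dict.mk jr) "required_skills" []).countP
            (fun s => PySem.Str.isIn (PySem.Str.lower s) (pvTextB project)) : Int)
      + ((PySem.Dict.getD (PySem.Dict.mk jr) "industry_keywords" []).countP
            (fun k => PySem.Str.isIn (PySem.Str.lower k) (pvTextB project)) : Int))
    (fun project => by
      simp only [PySem.List.foldl_count_if, pv_foldl_two,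
        show pvTextA = pvTextB from rfl]
      ring)
    mps
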